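-- pv_equiv track=rewrite | github.com/Bharath-kolekar/cogone | backend/app/core/values_driven_coder.py | _apply_maintainability_principle
-- ===== SOURCE A (Python) =====
-- def _apply_maintainability_principle(code: str) -> str:
--     """Apply maintainability principle to code"""
--     if "def " in code and '"""' not in code:
--         lines = code.split('\n')
--         for i, line in enumerate(lines):
--             if line.strip().startswith('def '):
--                 indent = len(line) - len(line.lstrip())
--                 docstring = ' ' * (indent + 4) + '"""\n'
--                 docstring += ' ' * (indent + 4) + 'Enterprise-grade implementation with clear business purpose.\n'
--                 docstring += ' ' * (indent + 4) + 'Designed for maintainability and future development.\n'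
--                 docstring += ' ' * (indent + 4) + '"""'
--                 lines.insert(i + 1, docstring)
--                 break
--         code = '\n'.join(lines)
--
--     return code
-- ===== SOURCE B (Python) =====
-- def _apply_maintainability_principle(code: str) -> str:
--     """Single pass over the text: splice the docstring in after the first def line,
--     instead of split/list-insert/join."""
--     if "def " in code and '"""' not in code:
--         return _with_doc(code)
--     return code
--
--
-- def _with_doc(text: str) -> str:
--     line, sep, rest = text.partition('\n')
--     if line.strip().startswith('def '):
--         pad = ' ' * (len(line) - len(line.lstrip()) + 4)
--         doc = (pad + '"""\n'
--                + pad + 'Enterprise-grade implementation with clear business purpose.\n'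
--                + pad + 'Designed for maintainability and future development.\n'
--                + pad + '"""')
--         return line + '\n' + doc + sep + rest
--     if not sep:
--         return text
--     return line + '\n' + _with_doc(rest)
-- ===== Notes on version B (the rewrite author's own statement) =====
-- stated objective: alternative
-- what changed: Replaces A's split-into-a-line-list / enumerate / list.insert / join pipeline by a single recursive pass over the text that partitions off one line at a time and splices the docstring in right after the first def line.
import Mathlib
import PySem

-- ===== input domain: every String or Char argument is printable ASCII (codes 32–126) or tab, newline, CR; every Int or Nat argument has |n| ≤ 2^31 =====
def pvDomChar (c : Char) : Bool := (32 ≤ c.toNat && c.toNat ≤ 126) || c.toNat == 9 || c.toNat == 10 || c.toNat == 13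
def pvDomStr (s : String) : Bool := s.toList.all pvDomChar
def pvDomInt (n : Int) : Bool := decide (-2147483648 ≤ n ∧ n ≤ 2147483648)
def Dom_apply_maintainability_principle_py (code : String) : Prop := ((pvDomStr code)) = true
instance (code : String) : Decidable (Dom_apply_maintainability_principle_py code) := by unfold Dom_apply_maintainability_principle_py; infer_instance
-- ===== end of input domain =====

-- B replaces A's split-into-lines / list.insert / join pipeline by a single recursive pass
-- that splices the docstring into the text after the first `def` line (objective: alternative).

-- ===== PORT A =====
-- docstring built line by line, ' ' * (indent+4) = List.replicate (indent+4) ' '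
def ampDocA (indent : Nat) : List Char :=
  List.replicate (indent + 4) ' ' ++ "\"\"\"\n".toList
    ++ (List.replicate (indent + 4) ' ' ++ "Enterprise-grade implementation with clear business purpose.\n".toList)
    ++ (List.replicate (indent + 4) ' ' ++ "Designed for maintainability and future development.\n".toList)
    ++ (List.replicate (indent + 4) ' ' ++ "\"\"\"".toList)

-- A's for-loop with enumerate / lines.insert(i+1, doc) / break: the first matching line
-- keeps everything before it unchanged and inserts the docstring right after it.
def ampScanA : List (List Char) → List (List Char)
  | [] => []
  | line :: rest =>
    if PySem.Chars.startswith (PySem.Chars.strip line) "def ".toList then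
      line :: ampDocA (line.length - (PySem.Chars.lstrip line).length) :: rest
    else line :: ampScanA rest

def apply_maintainability_principle_py (code : String) : String :=
  if PySem.Str.isIn "def " code && !(PySem.Str.isIn "\"\"\"" code) then
    String.ofList (PySem.Chars.join ['\n'] (ampScanA (PySem.Chars.splitOn code.toList ['\n'])))
  else code

-- ===== PORT B =====
def ampDocB (indent : Nat) : List Char :=
  List.replicate (indent + 4) ' ' ++ "\"\"\"\n".toList
    ++ (List.replicate (indent + 4) ' ' ++ "Enterprise-grade implementation with clear business purpose.\n".toList)
    ++ (List.replicate (indent + 4) ' ' ++ "Designed for maintainability and future development.\n".toList)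
    ++ (List.replicate (indent + 4) ' ' ++ "\"\"\"".toList)

-- text.partition('\n') ported by hand: exact for the single-character separator,
-- line = takeWhile (· ≠ '\n'), sep ++ rest = dropWhile (· ≠ '\n').
def ampWithDoc (cs : List Char) : List Char :=
  let line := cs.takeWhile (· ≠ '\n')
  let sepRest := cs.dropWhile (· ≠ '\n')
  if PySem.Chars.startswith (PySem.Chars.strip line) "def ".toList then
    line ++ '\n' :: (ampDocB (line.length - (PySem.Chars.lstrip line).length) ++ sepRest)
  else if h : sepRest = [] then cs
  else line ++ '\n' :: ampWithDoc sepRest.tail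
termination_by cs.length
decreasing_by
  have h1 : (cs.dropWhile (fun x => decide (x ≠ '\n'))).length ≤ cs.length :=
    List.length_dropWhile_le _ _
  have h2 : 0 < (cs.dropWhile (fun x => decide (x ≠ '\n'))).length :=
    List.length_pos_of_ne_nil h
  simp only [List.length_tail]
  omega

def apply_maintainability_principle_py_alt (code : String) : String :=
  if PySem.Str.isIn "def " code && !(PySem.Str.isIn "\"\"\"" code) then
    String.ofList (ampWithDoc code.toList)
  else code

-- ===== PRECONDITION & SPEC =====
def Spec_apply_maintainability_principle_py (code : String) (out : String) : Prop := out = apply_maintainability_principle_py_alt code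
instance (code : String) (out : String) : Decidable (Spec_apply_maintainability_principle_py code out) := by unfold Spec_apply_maintainability_principle_py; infer_instance

-- ===== CLAIM (what is proved, stated in full; the proofs are below) =====
def Claim_equal_apply_maintainability_principle_py : Prop := ∀ (code : String), Dom_apply_maintainability_principle_py code → Spec_apply_maintainability_principle_py code (apply_maintainability_principle_py code)

-- ===== LEMMAS AND PROOFS =====

-- proof-only model of splitting on '\n'
def ampLines : List Char → List (List Char)
  | [] => [[]]
  | c :: r => if c = '\n' then [] :: ampLines r else (ampLines r).modifyHead (c :: ·)

lemma ampLines_ne_nil : ∀ (cs : List Char), ampLines cs ≠ []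
  | [] => by simp [ampLines]
  | c :: r => by
    simp only [ampLines]
    split
    · simp
    · have hr := ampLines_ne_nil r
      cases h : ampLines r with
      | nil => exact absurd h hr
      | cons a t => simp [List.modifyHead]

lemma amp_go_spec (l : List Char) : ∀ (fuel : Nat), l.length < fuel →
    ∀ (cur : List Char) (acc : List (List Char)),
    PySem.Chars.splitOn.go ['\n'] fuel l cur acc
      = acc.reverse ++ (ampLines l).modifyHead (cur.reverse ++ ·) := by
  induction l with
  | nil =>
    intro fuel hf cur acc
    cases fuel with
    | zero => omega
    | succ f => simp [PySem.Chars.splitOn.go, ampLines, List.modifyHead]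
  | cons c r ih =>
    intro fuel hf cur acc
    cases fuel with
    | zero => omega
    | succ f =>
      by_cases hc : c = '\n'
      · subst hc
        rw [PySem.Chars.splitOn.go]
        rw [if_pos (show ([('\n' : Char)].isPrefixOf ('\n' :: r)) = true by simp [List.isPrefixOf])]
        simp only [List.length_cons, List.length_nil, List.drop_succ_cons, List.drop_zero]
        rw [ih f (by simpa using hf) [] (cur.reverse :: acc)]
        cases h : ampLines r with
        | nil => exact absurd h (ampLines_ne_nil r)
        | cons a t => simp [ampLines, List.modifyHead, h]
      · rw [PySem.Chars.splitOn.go]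
        rw [if_neg (show ¬ ([('\n' : Char)].isPrefixOf (c :: r)) = true from by
          simp [List.isPrefixOf]; exact fun h => hc h.symm)]
        rw [ih f (by simpa using hf) (c :: cur) acc]
        cases h : ampLines r with
        | nil => exact absurd h (ampLines_ne_nil r)
        | cons a t => simp [ampLines, hc, List.modifyHead, h]

lemma amp_splitOn_eq (cs : List Char) : PySem.Chars.splitOn cs ['\n'] = ampLines cs := by
  rw [PySem.Chars.splitOn, amp_go_spec cs (cs.length + 1) (by omega) [] []]
  cases h : ampLines cs with
  | nil => exact absurd h (ampLines_ne_nil cs)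
  | cons a t => simp [List.modifyHead]

lemma ampLines_no_nl {cs : List Char} (h : '\n' ∉ cs) : ampLines cs = [cs] := by
  induction cs with
  | nil => rfl
  | cons c r ih =>
    simp only [List.mem_cons, not_or] at h
    simp [ampLines, Ne.symm h.1, ih h.2]

lemma ampLines_append {line : List Char} (h : '\n' ∉ line) (rest : List Char) :
    ampLines (line ++ '\n' :: rest) = line :: ampLines rest := by
  induction line with
  | nil => simp [ampLines]
  | cons c l ih =>
    simp only [List.mem_cons, not_or] at h
    simp [ampLines, Ne.symm h.1, ih h.2, List.modifyHead]

lemma ampLines_cons_nl (r : List Char) : ampLines ('\n' :: r) = [] :: ampLines r := by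
  simp [ampLines]

lemma ampLines_cons_other {c : Char} (hc : c ≠ '\n') (r : List Char) :
    ampLines (c :: r) = (ampLines r).modifyHead (c :: ·) := by
  simp [ampLines, hc]

lemma amp_join_lines (cs : List Char) : PySem.Chars.join ['\n'] (ampLines cs) = cs := by
  induction cs with
  | nil => simp [ampLines, PySem.Chars.join_singleton]
  | cons c r ih =>
    by_cases hc : c = '\n'
    · subst hc
      rw [ampLines_cons_nl]
      cases h : ampLines r with
      | nil => exact absurd h (ampLines_ne_nil r)
      | cons a t =>
        rw [PySem.Chars.join_cons_cons, ← h, ih]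
        simp
    · rw [ampLines_cons_other hc]
      cases h : ampLines r with
      | nil => exact absurd h (ampLines_ne_nil r)
      | cons a t =>
        rw [h] at ih
        cases t with
        | nil => simp [List.modifyHead, PySem.Chars.join_singleton] at ih ⊢; rw [ih]
        | cons b t' =>
          simp only [List.modifyHead, PySem.Chars.join_cons_cons] at ih ⊢
          simp only [List.cons_append]
          rw [ih]

lemma ampScanA_ne_nil {L : List (List Char)} (h : L ≠ []) : ampScanA L ≠ [] := by
  cases L with
  | nil => exact absurd rfl h
  | cons a t => rw [ampScanA]; split <;> simp

lemma amp_main (cs : List Char) :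
    PySem.Chars.join ['\n'] (ampScanA (ampLines cs)) = ampWithDoc cs := by
    rw [ampWithDoc]
    by_cases hnil : cs.dropWhile (fun x => decide (x ≠ '\n')) = []
    · have hall : ∀ a ∈ cs, a ≠ '\n' := by
        simpa using List.dropWhile_eq_nil_iff.mp hnil
      have htake : cs.takeWhile (fun x => decide (x ≠ '\n')) = cs := by
        conv_rhs => rw [← List.takeWhile_append_dropWhile (p := fun x => decide (x ≠ '\n')) (l := cs)]
        rw [hnil, List.append_nil]
      have hnl : '\n' ∉ cs := fun hm => (hall _ hm) rfl
      rw [ampLines_no_nl hnl, htake, hnil]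
      rw [ampScanA]
      split
      · rw [PySem.Chars.join_cons_cons, PySem.Chars.join_singleton]
        simp [ampDocA, ampDocB]
      · simp [PySem.Chars.join_singleton, ampScanA]
    · set p : Char → Bool := fun x => decide (x ≠ '\n') with hp
      have hhead : p ((cs.dropWhile p).head hnil) = false := List.head_dropWhile_not p hnil
      have hheadnl : (cs.dropWhile p).head hnil = '\n' := by
        simpa [hp] using hhead
      have hsr : cs.dropWhile p = '\n' :: (cs.dropWhile p).tail := by
        rw [← hheadnl]
        exact (List.cons_head_tail hnil).symm
      have hdecomp : cs = cs.takeWhile p ++ '\n' :: (cs.dropWhile p).tail := by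
        conv_lhs => rw [← List.takeWhile_append_dropWhile (p := p) (l := cs)]
        rw [← hsr]
      have hnotin : '\n' ∉ cs.takeWhile p := fun hm => by
        have := List.mem_takeWhile_imp hm
        simp [hp] at this
      have hlt : ((cs.dropWhile p).tail).length < cs.length := by
        have h1 : (cs.dropWhile p).length ≤ cs.length := List.length_dropWhile_le _ _
        have h2 : 0 < (cs.dropWhile p).length := List.length_pos_of_ne_nil hnil
        simp only [List.length_tail]; omega
      conv_lhs => rw [hdecomp]
      rw [ampLines_append hnotin]
      rw [ampScanA]
      split
      · cases h : ampLines ((cs.dropWhile p).tail) with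
        | nil => exact absurd h (ampLines_ne_nil _)
        | cons a t =>
          rw [PySem.Chars.join_cons_cons, PySem.Chars.join_cons_cons, ← h, amp_join_lines]
          rw [hsr]
          simp [ampDocA, ampDocB, List.append_assoc]
      · cases h : ampScanA (ampLines ((cs.dropWhile p).tail)) with
        | nil => exact absurd h (ampScanA_ne_nil (ampLines_ne_nil _))
        | cons a t =>
          rw [PySem.Chars.join_cons_cons, ← h, amp_main ((cs.dropWhile p).tail)]
          simp
termination_by cs.length
decreasing_by exact hlt

-- ===== VERDICT (by name: the statement is the Claim_ definition above) =====
theorem apply_maintainability_principle_py_spec : Claim_equal_apply_maintainability_principle_py := by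
  intro code _
  unfold Spec_apply_maintainability_principle_py
  unfold apply_maintainability_principle_py apply_maintainability_principle_py_alt
  split
  · rw [amp_splitOn_eq, amp_main]
  · rfl
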